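-- pv_equiv track=rewrite | github.com/Rishabh-Barola/Course-Projects | COL106 projects/Assignments/Assignment 4/a4.py | modhorner
-- ===== SOURCE A (Python) =====
-- def modhorner(x,q):
-- 	#helper function to evaluate a polynomial in O(len(x))
-- 	#input specification : x : string , q : prime
-- 	#output specification : f(x)modq where f(x) = x[0]*26^m-1 + x[1]*26^m-2 + ... + x[m-1]*26^0 , where x[i] = ord(x[i])-ord('a')
--
-- 	ascii = lambda c: ord(c) - ord('A') # function to calculate values of characters , ord('A') = 65 , ord('?') = 63
--
-- 	#loop to calculate f(x)modq using horners rule , f(x) = (((x[0]*26+ x[1])*26 + x[2])*26 + x[3])*26 + ... + x[m-1]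
-- 	# time complexity of this loop is O(len(x)) so time complexity of modhorner is O(len(x))
-- 	# so auxillary space of modhorner is O(logq)
-- 	for i in range(0,len(x)):
-- 		if(i == 0):
-- 			result = ascii(x[i])%q
-- 		else:
-- 			result = ((result * 26)%q + ascii(x[i])%q)%q
-- 	return result
-- ===== SOURCE B (Python) =====
-- def modhorner(x, q):
--     # Direct power-sum evaluation: walk the string right-to-left keeping a
--     # running power of 26 mod q, instead of Horner nesting with an index test.
--     result = 0
--     p = 1
--     for c in reversed(x):
--         result = (result + (ord(c) - ord('A')) * p) % q
--         p = (p * 26) % q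
--     return result % q
-- ===== Notes on version B (the rewrite author's own statement) =====
-- stated objective: alternative
-- what changed: Replaces left-to-right Horner nesting (with an i==0 special case) by a right-to-left power-sum: a running power of 26 mod q is maintained and each character's term is added directly.
import Mathlib
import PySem

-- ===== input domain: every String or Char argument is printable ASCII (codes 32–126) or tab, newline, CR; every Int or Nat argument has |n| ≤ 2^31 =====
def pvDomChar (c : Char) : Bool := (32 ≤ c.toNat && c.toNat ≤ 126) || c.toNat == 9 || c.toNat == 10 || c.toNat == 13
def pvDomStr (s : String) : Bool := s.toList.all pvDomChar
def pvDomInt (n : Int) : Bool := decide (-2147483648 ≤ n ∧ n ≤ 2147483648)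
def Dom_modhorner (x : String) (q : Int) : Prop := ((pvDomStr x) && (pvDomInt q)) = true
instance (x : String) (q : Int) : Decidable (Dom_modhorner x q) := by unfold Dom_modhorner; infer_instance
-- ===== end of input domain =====

-- B re-implements the Horner-rule string hash as a right-to-left power-sum (alternative decomposition, same O(n) cost);
-- equal to A on every input where A returns (nonempty string, q ≠ 0).

-- ===== PORT A =====
-- Horner loop over enumerate(x): first index initialises, later ones fold.
def modhorner (x : String) (q : Int) : Int :=
  (PySem.List.enumerate x.toList 0).foldl
    (fun result ic =>
      if ic.1 == 0 then PySem.Int.mod ((ic.2.toNat : Int) - 65) q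
      else PySem.Int.mod (PySem.Int.mod (result * 26) q + PySem.Int.mod ((ic.2.toNat : Int) - 65) q) q)
    0

-- ===== PORT B =====
-- right-to-left fold carrying (result, running power of 26 mod q)
def modhorner_alt (x : String) (q : Int) : Int :=
  let st := x.toList.reverse.foldl
    (fun (rp : Int × Int) c =>
      (PySem.Int.mod (rp.1 + ((c.toNat : Int) - 65) * rp.2) q, PySem.Int.mod (rp.2 * 26) q))
    (0, 1)
  PySem.Int.mod st.1 q

-- ===== PRECONDITION & SPEC =====
-- A raises on exactly these inputs: UnboundLocalError on the empty string, ZeroDivisionError when q = 0; both are excluded.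
def Pre_modhorner (x : String) (q : Int) : Prop := x.toList ≠ [] ∧ q ≠ 0
instance (x : String) (q : Int) : Decidable (Pre_modhorner x q) := by unfold Pre_modhorner; infer_instance
def pvWitness_modhorner : String × Int := ("HELLO", 97)

def Spec_modhorner (x : String) (q : Int) (out : Int) : Prop := out = modhorner_alt x q
instance (x : String) (q : Int) (out : Int) : Decidable (Spec_modhorner x q out) := by unfold Spec_modhorner; infer_instance

-- ===== CLAIM (what is proved, stated in full; the proofs are below) =====
def Claim_equal_modhorner : Prop := ∀ (x : String) (q : Int), Dom_modhorner x q → Pre_modhorner x q → Spec_modhorner x q (modhorner x q)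

-- ===== LEMMAS AND PROOFS =====

-- the integer polynomial value both programs reduce mod q
def pvHorner (l : List Char) : Int :=
  l.foldl (fun acc c => acc * 26 + ((c.toNat : Int) - 65)) 0

def pvPolyRev : List Char → Int
  | [] => 0
  | c :: t => ((c.toNat : Int) - 65) + 26 * pvPolyRev t

theorem pvMod_sub_self (a q : Int) : q ∣ (PySem.Int.mod a q - a) :=
  ⟨-(PySem.Int.floordiv a q), by
    have h := PySem.Int.floordiv_mul_add_mod a q; linear_combination h⟩

theorem pvMod_congr {a b q : Int} (hq : q ≠ 0) (h : q ∣ (a - b)) :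
    PySem.Int.mod a q = PySem.Int.mod b q := by
  have hd : q ∣ (PySem.Int.mod a q - PySem.Int.mod b q) := by
    have h1 := pvMod_sub_self a q
    have h2 := pvMod_sub_self b q
    obtain ⟨k1, hk1⟩ := h1; obtain ⟨k2, hk2⟩ := h2; obtain ⟨k3, hk3⟩ := h
    exact ⟨k1 - k2 + k3, by linear_combination hk1 - hk2 + hk3⟩
  rcases lt_or_gt_of_ne hq with hneg | hpos
  · have hb1 := PySem.Int.mod_neg_bounds a hneg
    have hb2 := PySem.Int.mod_neg_bounds b hneg
    have hd' : (-q) ∣ (PySem.Int.mod a q - PySem.Int.mod b q) := (neg_dvd.mpr hd : -q ∣ _)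
    have := Int.eq_zero_of_abs_lt_dvd hd' (by
      rw [abs_lt]; constructor <;> omega)
    omega
  · have hb1 : 0 ≤ PySem.Int.mod a q := PySem.Int.mod_nonneg a hpos
    have hb2 : PySem.Int.mod a q < q := PySem.Int.mod_lt a hpos
    have hb3 : 0 ≤ PySem.Int.mod b q := PySem.Int.mod_nonneg b hpos
    have hb4 : PySem.Int.mod b q < q := PySem.Int.mod_lt b hpos
    have := Int.eq_zero_of_abs_lt_dvd hd (by rw [abs_lt]; constructor <;> omega)
    omega

theorem pvHorner_append (l : List Char) (c : Char) :
    pvHorner (l ++ [c]) = pvHorner l * 26 + ((c.toNat : Int) - 65) := by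
  simp [pvHorner, List.foldl_append]

theorem pvPolyRev_reverse (l : List Char) :
    pvPolyRev l.reverse = pvHorner l := by
  induction l using List.reverseRecOn with
  | nil => simp [pvPolyRev, pvHorner]
  | append_singleton l c ih =>
      rw [List.reverse_append, pvHorner_append]
      simp only [List.reverse_singleton, List.singleton_append, pvPolyRev, ih]
      ring

-- characterisation of A's fold on a nonempty list
theorem pvFoldA_eq (q : Int) (hq : q ≠ 0) (l : List Char) (hl : l ≠ []) (r0 : Int) :
    (PySem.List.enumerate l 0).foldl
      (fun result ic =>
        if ic.1 == 0 then PySem.Int.mod ((ic.2.toNat : Int) - 65) q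
        else PySem.Int.mod (PySem.Int.mod (result * 26) q + PySem.Int.mod ((ic.2.toNat : Int) - 65) q) q)
      r0 = PySem.Int.mod (pvHorner l) q := by
  induction l using List.reverseRecOn generalizing r0 with
  | nil => exact absurd rfl hl
  | append_singleton l c ih =>
    by_cases hl0 : l = []
    · subst hl0
      simp [PySem.List.enumerate, pvHorner]
    · rw [PySem.List.enumerate_append, List.foldl_append, ih hl0]
      have hlen : (((0 : Int) + l.length) == 0) = false := by
        have hne : l.length ≠ 0 := fun h => hl0 (List.eq_nil_of_length_eq_zero h)
        simp only [beq_eq_false_iff_ne, ne_eq, zero_add, Nat.cast_eq_zero]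
        exact hne
      simp only [PySem.List.enumerate, List.foldl_cons, List.foldl_nil, hlen, if_false,
        Bool.false_eq_true]
      rw [pvHorner_append]
      apply pvMod_congr hq
      obtain ⟨k1, hk1⟩ := pvMod_sub_self (PySem.Int.mod (pvHorner l) q * 26) q
      obtain ⟨k2, hk2⟩ := pvMod_sub_self ((c.toNat : Int) - 65) q
      obtain ⟨k3, hk3⟩ := pvMod_sub_self (pvHorner l) q
      exact ⟨k1 + k2 + 26 * k3, by linear_combination hk1 + hk2 + 26 * hk3⟩

-- invariant of B's fold: the accumulator stays congruent to res + p · pvPolyRev r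
theorem pvFoldB_congr (q : Int) (r : List Char) :
    ∀ (res p : Int),
      q ∣ ((r.foldl
        (fun (rp : Int × Int) c =>
          (PySem.Int.mod (rp.1 + ((c.toNat : Int) - 65) * rp.2) q, PySem.Int.mod (rp.2 * 26) q))
        (res, p)).1 - (res + p * pvPolyRev r)) := by
  induction r with
  | nil => intro res p; simp [pvPolyRev]
  | cons c t ih =>
    intro res p
    simp only [List.foldl_cons, pvPolyRev]
    obtain ⟨k3, hk3⟩ := ih (PySem.Int.mod (res + ((c.toNat : Int) - 65) * p) q) (PySem.Int.mod (p * 26) q)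
    obtain ⟨k1, hk1⟩ := pvMod_sub_self (res + ((c.toNat : Int) - 65) * p) q
    obtain ⟨k2, hk2⟩ := pvMod_sub_self (p * 26) q
    exact ⟨k3 + k1 + k2 * pvPolyRev t, by linear_combination hk3 + hk1 + pvPolyRev t * hk2⟩

theorem pvAlt_eq (x : String) (q : Int) (hq : q ≠ 0) :
    modhorner_alt x q = PySem.Int.mod (pvHorner x.toList) q := by
  unfold modhorner_alt
  apply pvMod_congr hq
  have h := pvFoldB_congr q x.toList.reverse 0 1
  rwa [pvPolyRev_reverse, zero_add, one_mul] at h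

-- ===== VERDICT (by name: the statement is the Claim_ definition above) =====
theorem modhorner_spec : Claim_equal_modhorner := by
  intro x q _ hpre
  unfold Spec_modhorner
  rw [pvAlt_eq x q hpre.2]
  exact pvFoldA_eq q hpre.2 x.toList hpre.1 0
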